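-- pv_equiv track=rewrite | github.com/hrwatts/clickup-engine | app/main.py | _classify_failure_groups
-- ===== SOURCE A (Python) =====
-- def _classify_failure_groups(failures: list[str]) -> dict[str, list[str]]:
--     groups = {
--         "task_status": [],
--         "scheduler_state": [],
--         "pulse_metrics": [],
--         "verification": [],
--         "followup": [],
--         "other": [],
--     }
--     for item in failures:
--         if item in {"task_status_write_failed", "task_status_unresolved"} or item.startswith("task_status_"):
--             groups["task_status"].append(item)
--         elif item == "scheduler_state" or item.endswith("scheduler_state"):
--             groups["scheduler_state"].append(item)
--         elif item in {"last_worked_at", "today_minutes", "next_eligible_at", "block_count_today", "progress_pulse", "energy_pulse", "friction_pulse"}: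
--             groups["pulse_metrics"].append(item)
--         elif item.startswith("verification_") or item == "refresh_after_continue":
--             groups["verification"].append(item)
--         elif item.startswith("scheduler_followup"):
--             groups["followup"].append(item)
--         else:
--             groups["other"].append(item)
--     return groups
-- ===== SOURCE B (Python) =====
-- _GROUP_NAMES = ["task_status", "scheduler_state", "pulse_metrics", "verification", "followup", "other"]
--
-- _PULSE = {"last_worked_at", "today_minutes", "next_eligible_at", "block_count_today",
--           "progress_pulse", "energy_pulse", "friction_pulse"}
--
--
-- def _group_of(item: str) -> str:
--     if item in {"task_status_write_failed", "task_status_unresolved"} or item.startswith("task_status_"):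
--         return "task_status"
--     if item == "scheduler_state" or item.endswith("scheduler_state"):
--         return "scheduler_state"
--     if item in _PULSE:
--         return "pulse_metrics"
--     if item.startswith("verification_") or item == "refresh_after_continue":
--         return "verification"
--     if item.startswith("scheduler_followup"):
--         return "followup"
--     return "other"
--
--
-- def _classify_failure_groups(failures: list[str]) -> dict[str, list[str]]:
--     return {name: [item for item in failures if _group_of(item) == name] for name in _GROUP_NAMES}
-- ===== Notes on version B (the rewrite author's own statement) =====
-- stated objective: idiomatic
-- what changed: B replaces A's single loop that appends each item into a mutable six-key dict by a first-match classifier function plus a dict comprehension that builds each group with one filter pass per group name (same precedence order).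
import Mathlib
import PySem

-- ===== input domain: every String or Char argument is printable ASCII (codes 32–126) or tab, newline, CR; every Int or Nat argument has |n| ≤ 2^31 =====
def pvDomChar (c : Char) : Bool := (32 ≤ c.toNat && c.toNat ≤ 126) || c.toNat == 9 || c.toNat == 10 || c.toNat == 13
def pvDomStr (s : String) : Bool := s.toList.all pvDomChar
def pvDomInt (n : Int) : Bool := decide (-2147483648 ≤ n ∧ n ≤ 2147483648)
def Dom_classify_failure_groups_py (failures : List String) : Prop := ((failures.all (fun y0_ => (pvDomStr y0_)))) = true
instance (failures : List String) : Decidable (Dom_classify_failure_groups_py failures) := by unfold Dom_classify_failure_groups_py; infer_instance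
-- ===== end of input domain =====

-- B replaces A's single append-to-dict loop by one filter pass per group name (same precedence, via a
-- first-match classifier); objective: idiomatic/alternative, not faster.

-- ===== PORT A =====
-- loop body of A's for-loop (the if/elif chain, appending into the dict)
def pvStepA (d : PySem.Dict String (List String)) (item : String) : PySem.Dict String (List String) :=
  if ["task_status_write_failed", "task_status_unresolved"].contains item
      || PySem.Str.startswith item "task_status_" then
    d.modify "task_status" [] (· ++ [item])
  else if item == "scheduler_state" || PySem.Str.endswith item "scheduler_state" then
    d.modify "scheduler_state" [] (· ++ [item])
  else if ["last_worked_at", "today_minutes", "next_eligible_at", "block_count_today",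
           "progress_pulse", "energy_pulse", "friction_pulse"].contains item then
    d.modify "pulse_metrics" [] (· ++ [item])
  else if PySem.Str.startswith item "verification_" || item == "refresh_after_continue" then
    d.modify "verification" [] (· ++ [item])
  else if PySem.Str.startswith item "scheduler_followup" then
    d.modify "followup" [] (· ++ [item])
  else
    d.modify "other" [] (· ++ [item])

def classify_failure_groups_py (failures : List String) : List (String × List String) :=
  (failures.foldl pvStepA
    (PySem.Dict.ofList [("task_status", []), ("scheduler_state", []), ("pulse_metrics", []),
                        ("verification", []), ("followup", []), ("other", [])])).items

-- ===== PORT B =====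
-- B's first-match classifier (_group_of in Source B)
def pvGroupOf (item : String) : String :=
  if ["task_status_write_failed", "task_status_unresolved"].contains item
      || PySem.Str.startswith item "task_status_" then "task_status"
  else if item == "scheduler_state" || PySem.Str.endswith item "scheduler_state" then "scheduler_state"
  else if ["last_worked_at", "today_minutes", "next_eligible_at", "block_count_today",
           "progress_pulse", "energy_pulse", "friction_pulse"].contains item then "pulse_metrics"
  else if PySem.Str.startswith item "verification_" || item == "refresh_after_continue" then "verification"
  else if PySem.Str.startswith item "scheduler_followup" then "followup"
  else "other"

def classify_failure_groups_py_alt (failures : List String) : List (String × List String) :=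
  ["task_status", "scheduler_state", "pulse_metrics", "verification", "followup", "other"].map
    (fun name => (name, failures.filter (fun item => pvGroupOf item == name)))

-- ===== PRECONDITION & SPEC =====
def Spec_classify_failure_groups_py (failures : List String) (out : List (String × List String)) : Prop := out = classify_failure_groups_py_alt failures
instance (failures : List String) (out : List (String × List String)) : Decidable (Spec_classify_failure_groups_py failures out) := by unfold Spec_classify_failure_groups_py; infer_instance

-- ===== CLAIM (what is proved, stated in full; the proofs are below) =====
def Claim_equal_classify_failure_groups_py : Prop := ∀ (failures : List String), Dom_classify_failure_groups_py failures → Spec_classify_failure_groups_py failures (classify_failure_groups_py failures)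

-- ===== LEMMAS AND PROOFS =====

-- the group filter B builds for one name
def pvG (xs : List String) (name : String) : List String :=
  xs.filter (fun item => pvGroupOf item == name)

theorem pvG_cons (x : String) (xs : List String) (name : String) :
    pvG (x :: xs) name = (if pvGroupOf x == name then [x] else []) ++ pvG xs name := by
  simp only [pvG, List.filter_cons]
  split <;> simp_all

-- loop invariant: A's fold over an arbitrary six-entry accumulator appends B's per-group filters
theorem pvLoopA (xs : List String) (t s p v f o : List String) :
    xs.foldl pvStepA
      (PySem.Dict.mk [("task_status", t), ("scheduler_state", s), ("pulse_metrics", p),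
                      ("verification", v), ("followup", f), ("other", o)]) =
    PySem.Dict.mk [("task_status", t ++ pvG xs "task_status"),
                   ("scheduler_state", s ++ pvG xs "scheduler_state"),
                   ("pulse_metrics", p ++ pvG xs "pulse_metrics"),
                   ("verification", v ++ pvG xs "verification"),
                   ("followup", f ++ pvG xs "followup"),
                   ("other", o ++ pvG xs "other")] := by
  induction xs generalizing t s p v f o with
  | nil => simp [pvG]
  | cons x xs ih =>
    simp only [List.foldl_cons]
    have hstep : pvStepA (PySem.Dict.mk [("task_status", t), ("scheduler_state", s), ("pulse_metrics", p),
          ("verification", v), ("followup", f), ("other", o)]) x =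
        PySem.Dict.mk [("task_status", t ++ (if pvGroupOf x == "task_status" then [x] else [])),
                       ("scheduler_state", s ++ (if pvGroupOf x == "scheduler_state" then [x] else [])),
                       ("pulse_metrics", p ++ (if pvGroupOf x == "pulse_metrics" then [x] else [])),
                       ("verification", v ++ (if pvGroupOf x == "verification" then [x] else [])),
                       ("followup", f ++ (if pvGroupOf x == "followup" then [x] else [])),
                       ("other", o ++ (if pvGroupOf x == "other" then [x] else []))] := by
      unfold pvStepA
      by_cases h1 : (["task_status_write_failed", "task_status_unresolved"].contains x
          || PySem.Str.startswith x "task_status_") = true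
      · rw [if_pos h1]
        have hg : pvGroupOf x = "task_status" := by unfold pvGroupOf; rw [if_pos h1]
        rw [hg]; simp [PySem.Dict.modify, PySem.Dict.insert, PySem.Dict.getD, PySem.Dict.get?, PySem.Dict.contains]
      · rw [if_neg h1]
        by_cases h2 : (x == "scheduler_state" || PySem.Str.endswith x "scheduler_state") = true
        · rw [if_pos h2]
          have hg : pvGroupOf x = "scheduler_state" := by
            unfold pvGroupOf; rw [if_neg h1, if_pos h2]
          rw [hg]; simp [PySem.Dict.modify, PySem.Dict.insert, PySem.Dict.getD, PySem.Dict.get?, PySem.Dict.contains]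
        · rw [if_neg h2]
          by_cases h3 : (["last_worked_at", "today_minutes", "next_eligible_at", "block_count_today",
              "progress_pulse", "energy_pulse", "friction_pulse"].contains x) = true
          · rw [if_pos h3]
            have hg : pvGroupOf x = "pulse_metrics" := by
              unfold pvGroupOf; rw [if_neg h1, if_neg h2, if_pos h3]
            rw [hg]; simp [PySem.Dict.modify, PySem.Dict.insert, PySem.Dict.getD, PySem.Dict.get?, PySem.Dict.contains]
          · rw [if_neg h3]
            by_cases h4 : (PySem.Str.startswith x "verification_" || x == "refresh_after_continue") = true
            · rw [if_pos h4]
              have hg : pvGroupOf x = "verification" := by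
                unfold pvGroupOf; rw [if_neg h1, if_neg h2, if_neg h3, if_pos h4]
              rw [hg]; simp [PySem.Dict.modify, PySem.Dict.insert, PySem.Dict.getD, PySem.Dict.get?, PySem.Dict.contains]
            · rw [if_neg h4]
              by_cases h5 : (PySem.Str.startswith x "scheduler_followup") = true
              · rw [if_pos h5]
                have hg : pvGroupOf x = "followup" := by
                  unfold pvGroupOf; rw [if_neg h1, if_neg h2, if_neg h3, if_neg h4, if_pos h5]
                rw [hg]; simp [PySem.Dict.modify, PySem.Dict.insert, PySem.Dict.getD, PySem.Dict.get?, PySem.Dict.contains]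
              · rw [if_neg h5]
                have hg : pvGroupOf x = "other" := by
                  unfold pvGroupOf; rw [if_neg h1, if_neg h2, if_neg h3, if_neg h4, if_neg h5]
                rw [hg]; simp [PySem.Dict.modify, PySem.Dict.insert, PySem.Dict.getD, PySem.Dict.get?, PySem.Dict.contains]
    rw [hstep]
    rw [ih]
    simp [pvG_cons, List.append_assoc]

-- ===== VERDICT (by name: the statement is the Claim_ definition above) =====
theorem classify_failure_groups_py_spec : Claim_equal_classify_failure_groups_py := by
  intro failures _
  show classify_failure_groups_py failures = classify_failure_groups_py_alt failures
  unfold classify_failure_groups_py classify_failure_groups_py_alt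
  rw [show PySem.Dict.ofList [("task_status", ([] : List String)), ("scheduler_state", []),
        ("pulse_metrics", []), ("verification", []), ("followup", []), ("other", [])] =
      PySem.Dict.mk [("task_status", []), ("scheduler_state", []), ("pulse_metrics", []),
                     ("verification", []), ("followup", []), ("other", [])] from by decide]
  rw [pvLoopA]
  simp [pvG]
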